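-- pv_equiv track=rewrite | github.com/cnavyxu/pdf_segmentation | utils/cut_pdf.py | generate_span
-- ===== SOURCE A (Python) =====
-- def wrap_h(page_h, d):  # 定义函数
--     if d <= 0:  # 条件判断
--         return 0  # 返回结果
--     if d >= page_h:  # 条件判断
--         return int(page_h)  # 返回结果
--     return int(d)  # 返回结果
--
-- def generate_span(split_list, have_pix_max, page_h, up_offset, down_offset):  # 定义函数
--     res = []  # 变量赋值
--     for i, plit_d in enumerate(split_list):  # 循环遍历
--         if i == len(split_list) - 1:  # 条件判断
--             res.append(  # 添加元素到列表
--                 (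
--                     wrap_h(page_h, split_list[i] - up_offset),
--                     wrap_h(page_h, have_pix_max + down_offset),
--                 )
--             )
--         else:  # 否则执行
--             res.append(  # 添加元素到列表
--                 (
--                     wrap_h(page_h, split_list[i] - up_offset),
--                     wrap_h(page_h, split_list[i + 1]) - up_offset,
--                 )
--             )
--     return res  # 返回结果
-- ===== SOURCE B (Python) =====
-- def wrap_h(page_h, d):
--     if d <= 0:
--         return 0
--     if d >= page_h:
--         return int(page_h)
--     return int(d)
--
-- def generate_span(split_list, have_pix_max, page_h, up_offset, down_offset):
--     # Build the spans back-to-front: walk the splits in reverse, carrying the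
--     # end value of the span that follows; the carry starts at the sentinel end.
--     res = []
--     end = wrap_h(page_h, have_pix_max + down_offset)
--     for x in reversed(split_list):
--         res.append((wrap_h(page_h, x - up_offset), end))
--         end = wrap_h(page_h, x) - up_offset
--     res.reverse()
--     return res
-- ===== Notes on version B (the rewrite author's own statement) =====
-- stated objective: alternative
-- what changed: Builds the result back-to-front: a reverse traversal carries the following span's end value in an accumulator seeded with the sentinel end, eliminating A's enumerate/index arithmetic and its i==len-1 last-element branch.
import Mathlib
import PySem

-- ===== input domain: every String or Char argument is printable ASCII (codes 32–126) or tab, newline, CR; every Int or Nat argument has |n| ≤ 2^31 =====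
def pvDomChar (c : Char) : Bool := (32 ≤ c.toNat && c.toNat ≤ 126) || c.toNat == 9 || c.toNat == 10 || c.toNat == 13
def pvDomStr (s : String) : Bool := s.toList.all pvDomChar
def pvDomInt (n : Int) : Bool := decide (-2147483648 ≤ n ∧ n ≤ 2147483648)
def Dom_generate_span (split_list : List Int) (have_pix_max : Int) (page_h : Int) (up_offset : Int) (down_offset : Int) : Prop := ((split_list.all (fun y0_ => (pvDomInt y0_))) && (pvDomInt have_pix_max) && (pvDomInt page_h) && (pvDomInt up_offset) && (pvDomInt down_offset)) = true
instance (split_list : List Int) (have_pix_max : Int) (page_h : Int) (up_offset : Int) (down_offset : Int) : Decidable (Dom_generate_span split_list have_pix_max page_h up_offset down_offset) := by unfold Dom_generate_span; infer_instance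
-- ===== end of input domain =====

-- B builds the spans back-to-front: a reverse traversal carries the following span's end
-- value (seeded with the sentinel end), removing A's enumerate/index loop and its
-- last-element branch (alternative decomposition; same cost).

-- ===== PORT A =====
def wrap_h (page_h : Int) (d : Int) : Int :=
  if d ≤ 0 then 0
  else if d ≥ page_h then page_h   -- int(page_h): identity on int
  else d                           -- int(d): identity on int

def generate_span (split_list : List Int) (have_pix_max : Int) (page_h : Int) (up_offset : Int) (down_offset : Int) : List (Int × Int) :=
  (PySem.List.enumerate split_list).foldl (fun res p =>
    if p.1 == (split_list.length : Int) - 1 then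
      res ++ [(wrap_h page_h (PySem.List.pyGetD split_list p.1 0 - up_offset),
               wrap_h page_h (have_pix_max + down_offset))]
    else
      res ++ [(wrap_h page_h (PySem.List.pyGetD split_list p.1 0 - up_offset),
               wrap_h page_h (PySem.List.pyGetD split_list (p.1 + 1) 0) - up_offset)]) []

-- ===== PORT B =====
-- the reversed-iteration loop: state = (res, end); then res.reverse()
def generate_span_alt (split_list : List Int) (have_pix_max : Int) (page_h : Int) (up_offset : Int) (down_offset : Int) : List (Int × Int) :=
  let st := split_list.reverse.foldl
    (fun (s : List (Int × Int) × Int) x =>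
      (s.1 ++ [(wrap_h page_h (x - up_offset), s.2)], wrap_h page_h x - up_offset))
    ([], wrap_h page_h (have_pix_max + down_offset))
  st.1.reverse

-- ===== PRECONDITION & SPEC =====
def Spec_generate_span (split_list : List Int) (have_pix_max : Int) (page_h : Int) (up_offset : Int) (down_offset : Int) (out : List (Int × Int)) : Prop := out = generate_span_alt split_list have_pix_max page_h up_offset down_offset
instance (split_list : List Int) (have_pix_max : Int) (page_h : Int) (up_offset : Int) (down_offset : Int) (out : List (Int × Int)) : Decidable (Spec_generate_span split_list have_pix_max page_h up_offset down_offset out) := by unfold Spec_generate_span; infer_instance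

-- ===== CLAIM (what is proved, stated in full; the proofs are below) =====
def Claim_equal_generate_span : Prop := ∀ (split_list : List Int) (have_pix_max : Int) (page_h : Int) (up_offset : Int) (down_offset : Int), Dom_generate_span split_list have_pix_max page_h up_offset down_offset → Spec_generate_span split_list have_pix_max page_h up_offset down_offset (generate_span split_list have_pix_max page_h up_offset down_offset)

-- ===== LEMMAS AND PROOFS =====

-- proof-only helper: cons-recursive description of the spans, carrying the sentinel end e
def gsGo (page_h up_offset e : Int) : List Int → List (Int × Int)
  | [] => []
  | x :: rest =>
      (wrap_h page_h (x - up_offset),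
       match rest with
       | [] => e
       | y :: _ => wrap_h page_h y - up_offset) :: gsGo page_h up_offset e rest

-- proof-only helper: zip-of-parallel-lists description (bridge between A and gsGo)
def gsZip (split_list : List Int) (have_pix_max : Int) (page_h : Int) (up_offset : Int) (down_offset : Int) : List (Int × Int) :=
  (split_list.map (fun x => wrap_h page_h (x - up_offset))).zip
    ((PySem.List.slice split_list (some 1) none).map (fun x => wrap_h page_h x - up_offset)
      ++ [wrap_h page_h (have_pix_max + down_offset)])

-- A's foldl, written as a map over the enumeration
lemma gsA_eq_map (split_list : List Int) (have_pix_max : Int) (page_h : Int) (up_offset : Int) (down_offset : Int) :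
    generate_span split_list have_pix_max page_h up_offset down_offset =
      (PySem.List.enumerate split_list).map (fun p =>
        if p.1 == (split_list.length : Int) - 1 then
          (wrap_h page_h (PySem.List.pyGetD split_list p.1 0 - up_offset),
           wrap_h page_h (have_pix_max + down_offset))
        else
          (wrap_h page_h (PySem.List.pyGetD split_list p.1 0 - up_offset),
           wrap_h page_h (PySem.List.pyGetD split_list (p.1 + 1) 0) - up_offset)) := by
  unfold generate_span
  have hfun : (fun (res : List (Int × Int)) (p : Int × Int) =>
      if p.1 == (split_list.length : Int) - 1 then
        res ++ [(wrap_h page_h (PySem.List.pyGetD split_list p.1 0 - up_offset),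
                 wrap_h page_h (have_pix_max + down_offset))]
      else
        res ++ [(wrap_h page_h (PySem.List.pyGetD split_list p.1 0 - up_offset),
                 wrap_h page_h (PySem.List.pyGetD split_list (p.1 + 1) 0) - up_offset)]) =
      (fun res p =>
        res ++ [if p.1 == (split_list.length : Int) - 1 then
          (wrap_h page_h (PySem.List.pyGetD split_list p.1 0 - up_offset),
           wrap_h page_h (have_pix_max + down_offset))
        else
          (wrap_h page_h (PySem.List.pyGetD split_list p.1 0 - up_offset),
           wrap_h page_h (PySem.List.pyGetD split_list (p.1 + 1) 0) - up_offset)]) := by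
    funext res p; split <;> rfl
  rw [hfun, PySem.List.foldl_append_singleton_eq_map, List.nil_append]

-- A equals the zip description
lemma gsA_eq_zip (split_list : List Int) (have_pix_max : Int) (page_h : Int) (up_offset : Int) (down_offset : Int) :
    generate_span split_list have_pix_max page_h up_offset down_offset =
      gsZip split_list have_pix_max page_h up_offset down_offset := by
  rw [gsA_eq_map]
  unfold gsZip
  rw [PySem.List.slice_from_one]
  apply List.ext_getElem
  · simp [PySem.List.length_enumerate]; omega
  · intro i h1 h2
    simp only [PySem.List.length_enumerate, List.length_map] at h1
    rw [List.getElem_map, PySem.List.getElem_enumerate]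
    rw [List.getElem_zip, List.getElem_map]
    simp only [Int.zero_add]
    by_cases hlast : i = split_list.length - 1
    · have hc : ((i : Int) == (split_list.length : Int) - 1) = true := by
        simp only [beq_iff_eq]; omega
      rw [if_pos hc]
      have hends : ((split_list.tail.map (fun x => wrap_h page_h x - up_offset)) ++
          [wrap_h page_h (have_pix_max + down_offset)])[i]'(by simp [List.length_tail]; omega) =
          wrap_h page_h (have_pix_max + down_offset) := by
        rw [List.getElem_append_right (by simp [List.length_tail]; omega)]
        simp
      rw [hends]
      rw [PySem.List.pyGetD_natCast, List.getD_eq_getElem _ _ h1]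
    · have hc : ((i : Int) == (split_list.length : Int) - 1) = false := by
        simp only [beq_eq_false_iff_ne, ne_eq]; omega
      rw [if_neg (by simp [hc])]
      have hi1 : i < split_list.length - 1 := by omega
      have hends : ((split_list.tail.map (fun x => wrap_h page_h x - up_offset)) ++
          [wrap_h page_h (have_pix_max + down_offset)])[i]'(by simp [List.length_tail]; omega) =
          wrap_h page_h (split_list[i + 1]'(by omega)) - up_offset := by
        rw [List.getElem_append_left (by simp [List.length_tail]; omega)]
        rw [List.getElem_map, List.getElem_tail]
      rw [hends]
      rw [PySem.List.pyGetD_natCast, List.getD_eq_getElem _ _ h1]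
      have : ((i : Int) + 1) = ((i + 1 : Nat) : Int) := by push_cast; ring
      rw [this, PySem.List.pyGetD_natCast, List.getD_eq_getElem _ _ (by omega)]

-- the zip description equals the cons-recursive one
lemma gsZip_eq_go (split_list : List Int) (have_pix_max : Int) (page_h : Int) (up_offset : Int) (down_offset : Int) :
    gsZip split_list have_pix_max page_h up_offset down_offset =
      gsGo page_h up_offset (wrap_h page_h (have_pix_max + down_offset)) split_list := by
  unfold gsZip
  rw [PySem.List.slice_from_one]
  induction split_list with
  | nil => simp [gsGo]
  | cons x rest ih =>
    cases rest with
    | nil => simp [gsGo]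
    | cons y rest' =>
      simp only [List.map_cons, List.tail_cons, List.cons_append, List.zip_cons_cons, gsGo]
      exact congrArg _ ih

-- invariant of B's reversed-iteration loop
lemma gsB_loop (page_h up_offset : Int) (l : List Int) (e : Int) :
    l.reverse.foldl
      (fun (s : List (Int × Int) × Int) x =>
        (s.1 ++ [(wrap_h page_h (x - up_offset), s.2)], wrap_h page_h x - up_offset))
      ([], e) =
    ((gsGo page_h up_offset e l).reverse,
     match l with
     | [] => e
     | x :: _ => wrap_h page_h x - up_offset) := by
  induction l with
  | nil => simp [gsGo]
  | cons x rest ih =>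
    simp only [List.reverse_cons, List.foldl_append, ih, List.foldl_cons, List.foldl_nil, gsGo,
      List.reverse_cons]

-- ===== VERDICT (by name: the statement is the Claim_ definition above) =====
theorem generate_span_spec : Claim_equal_generate_span := by
  intro split_list have_pix_max page_h up_offset down_offset _
  show generate_span split_list have_pix_max page_h up_offset down_offset =
       generate_span_alt split_list have_pix_max page_h up_offset down_offset
  rw [gsA_eq_zip, gsZip_eq_go]
  unfold generate_span_alt
  rw [gsB_loop]
  simp
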